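-- pv_equiv track=rewrite | github.com/Dherlou/AdventOfCode2022 | 1/main.py | build_calories_statistics
-- ===== SOURCE A (Python) =====
-- def build_calories_statistics(calories_input: list[str]) -> dict[int, int]:
--     calories: dict[int, int] = {}
--     elf: int = 1
--
--     for line in calories_input:
--         if line:
--             calories[elf] = int(line) + calories.get(elf, 0)
--         else:
--             elf += 1
--
--     return calories
-- ===== SOURCE B (Python) =====
-- def build_calories_statistics(calories_input: list[str]) -> dict[int, int]:
--     result: dict[int, int] = {}
--     elf = 1
--     i = 0
--     n = len(calories_input)
--     while i < n:
--         if calories_input[i]: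
--             j = i
--             while j < n and calories_input[j]:
--                 j += 1
--             result[elf] = sum(int(x) for x in calories_input[i:j])
--             i = j
--         else:
--             j = i
--             while j < n and not calories_input[j]:
--                 j += 1
--             elf += j - i
--             i = j
--     return result
-- ===== Notes on version B (the rewrite author's own statement) =====
-- stated objective: alternative
-- what changed: B replaces A's per-line loop that accumulates into the dict via calories.get(elf,0) with a run-at-a-time pass: it finds each maximal run of non-blank lines and writes its sum into result[elf] once, and advances elf by the length of each blank run.
import Mathlib
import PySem

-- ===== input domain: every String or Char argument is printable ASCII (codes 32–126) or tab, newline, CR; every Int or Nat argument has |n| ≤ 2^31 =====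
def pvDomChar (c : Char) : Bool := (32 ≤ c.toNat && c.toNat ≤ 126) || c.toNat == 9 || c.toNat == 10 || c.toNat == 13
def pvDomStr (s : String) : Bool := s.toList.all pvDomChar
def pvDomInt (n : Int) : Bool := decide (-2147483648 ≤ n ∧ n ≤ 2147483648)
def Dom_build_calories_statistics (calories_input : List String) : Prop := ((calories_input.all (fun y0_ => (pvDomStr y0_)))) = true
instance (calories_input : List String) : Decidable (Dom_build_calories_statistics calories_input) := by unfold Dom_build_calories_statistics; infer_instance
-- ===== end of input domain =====

-- B replaces A's per-line accumulation into the dict by a group-first pass: it scans each maximal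
-- run of blank / non-blank lines, summing a non-blank run once into result[elf] and advancing elf
-- by the length of a blank run (objective: alternative decomposition, same cost).

-- ===== PORT A =====
-- 'if line' = line is non-empty; int(line) = PySem.Int.ofStr? (under Pre_ it is some, so getD 0 is exact)
def pvStepA (st : PySem.Dict Int Int × Int) (line : String) : PySem.Dict Int Int × Int :=
  if line.toList ≠ [] then
    (st.1.insert st.2 (((PySem.Int.ofStr? line).getD 0) + st.1.getD st.2 0), st.2)
  else
    (st.1, st.2 + 1)

def build_calories_statistics (calories_input : List String) : List (Int × Int) :=
  (calories_input.foldl pvStepA (PySem.Dict.empty, 1)).1.items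

-- ===== PORT B =====
-- truthiness of a line, as Source B tests it
def pvNonBlank (s : String) : Bool := !s.toList.isEmpty

-- sum(int(x) for x in run)  (under Pre_ each ofStr? is some, so getD 0 is exact)
def pvRunSum (run : List String) : Int := (run.map (fun s => (PySem.Int.ofStr? s).getD 0)).sum

-- Source B's outer while loop: each step consumes one maximal run (inner while = takeWhile/dropWhile)
def pvGoB : List String → Int → PySem.Dict Int Int → PySem.Dict Int Int
  | [], _, d => d
  | l :: rest, elf, d =>
    if pvNonBlank l then
      pvGoB (rest.dropWhile pvNonBlank) elf
        (d.insert elf (pvRunSum (l :: rest.takeWhile pvNonBlank)))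
    else
      pvGoB (rest.dropWhile (fun s => !pvNonBlank s))
        (elf + 1 + (rest.takeWhile (fun s => !pvNonBlank s)).length) d
termination_by xs => xs.length
decreasing_by
  · exact Nat.lt_succ_of_le (List.length_dropWhile_le ..)
  · exact Nat.lt_succ_of_le (List.length_dropWhile_le ..)

def build_calories_statistics_alt (calories_input : List String) : List (Int × Int) :=
  (pvGoB calories_input 1 PySem.Dict.empty).items

-- ===== PRECONDITION & SPEC =====
-- Pre_ excludes exactly the inputs where Python A raises ValueError: a non-blank line that
-- int() cannot parse (ofStr? = none).  A returns on every input satisfying Pre_.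
def Pre_build_calories_statistics (calories_input : List String) : Prop :=
  ∀ s ∈ calories_input, s.toList ≠ [] → (PySem.Int.ofStr? s).isSome
instance (calories_input : List String) : Decidable (Pre_build_calories_statistics calories_input) := by
  unfold Pre_build_calories_statistics; infer_instance

def pvWitness_build_calories_statistics : List String := ["100", "", "200", "300"]

def Spec_build_calories_statistics (calories_input : List String) (out : List (Int × Int)) : Prop := out = build_calories_statistics_alt calories_input
instance (calories_input : List String) (out : List (Int × Int)) : Decidable (Spec_build_calories_statistics calories_input out) := by unfold Spec_build_calories_statistics; infer_instance

-- ===== CLAIM (what is proved, stated in full; the proofs are below) =====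
def Claim_equal_build_calories_statistics : Prop := ∀ (calories_input : List String), Dom_build_calories_statistics calories_input → Pre_build_calories_statistics calories_input → Spec_build_calories_statistics calories_input (build_calories_statistics calories_input)

-- ===== LEMMAS AND PROOFS =====

-- A's fold over a run of blank lines only advances the elf counter
theorem pv_foldA_blanks (bs : List String) (d : PySem.Dict Int Int) (elf : Int)
    (h : ∀ s ∈ bs, pvNonBlank s = false) :
    List.foldl pvStepA (d, elf) bs = (d, elf + bs.length) := by
  induction bs generalizing elf with
  | nil => simp
  | cons l bs ih =>
    have hl : l.toList = [] := by
      have := h l (by simp)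
      simpa [pvNonBlank] using this
    simp only [List.foldl_cons]
    have hstep : pvStepA (d, elf) l = (d, elf + 1) := by simp [pvStepA, hl]
    rw [hstep, ih _ (fun s hs => h s (by simp [hs]))]
    simp; ring

-- A's fold over a non-empty run of non-blank lines is one insert of the run's sum
theorem pv_foldA_run (run : List String) (d : PySem.Dict Int Int) (elf : Int)
    (hne : run ≠ []) (h : ∀ s ∈ run, pvNonBlank s = true) :
    List.foldl pvStepA (d, elf) run = (d.insert elf (pvRunSum run + d.getD elf 0), elf) := by
  induction run generalizing d with
  | nil => exact absurd rfl hne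
  | cons l run ih =>
    have hl : l.toList ≠ [] := by
      have := h l (by simp); simpa [pvNonBlank] using this
    simp only [List.foldl_cons]
    have hstep : pvStepA (d, elf) l
        = (d.insert elf (((PySem.Int.ofStr? l).getD 0) + d.getD elf 0), elf) := by
      simp [pvStepA, hl]
    rw [hstep]
    rcases run with _ | ⟨m, run⟩
    · simp [pvRunSum]
    · rw [ih _ (by simp) (fun s hs => h s (by simp at hs ⊢; tauto))]
      rw [PySem.Dict.getD_insert_self, PySem.Dict.insert_insert_self]
      simp [pvRunSum]; ring_nf

-- the head of dropWhile p fails p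
theorem pv_head_dropWhile (p : String → Bool) (l : List String) (x : String) (xs : List String)
    (h : l.dropWhile p = x :: xs) : p x = false := by
  have := List.head?_dropWhile_not p l
  rw [h] at this; simpa using this

-- main invariant lemma: A's fold equals B's run-at-a-time recursion, given that all keys of d
-- are ≤ elf and, if the next line is non-blank, elf itself is still fresh
theorem pv_main (xs : List String) (elf : Int) (d : PySem.Dict Int Int)
    (h1 : ∀ k, d.contains k = true → k ≤ elf)
    (h2 : ∀ l rest, xs = l :: rest → pvNonBlank l = true → d.contains elf = false) :
    (List.foldl pvStepA (d, elf) xs).1 = pvGoB xs elf d := by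
  induction xs, elf, d using pvGoB.induct with
  | case1 elf d => simp [pvGoB]
  | case2 l rest elf d hnb ih =>
    -- non-blank run
    have hsplit : l :: rest = (l :: rest.takeWhile pvNonBlank) ++ rest.dropWhile pvNonBlank := by
      simp [List.takeWhile_append_dropWhile]
    conv_lhs => rw [hsplit]
    rw [List.foldl_append]
    rw [pv_foldA_run _ d elf (by simp)
      (by intro s hs
          rw [List.mem_cons] at hs
          rcases hs with rfl | hs
          · exact hnb
          · exact List.mem_takeWhile_imp hs)]
    have hfresh : d.contains elf = false := h2 l rest rfl hnb
    rw [PySem.Dict.getD_of_not_contains d 0 hfresh, add_zero]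
    rw [show pvGoB (l :: rest) elf d
        = pvGoB (rest.dropWhile pvNonBlank) elf
            (d.insert elf (pvRunSum (l :: rest.takeWhile pvNonBlank))) from by
      rw [pvGoB]; simp [hnb]]
    apply ih
    · intro k hk
      rw [PySem.Dict.contains_insert] at hk
      simp only [Bool.or_eq_true, beq_iff_eq] at hk
      rcases hk with hk | hk
      · omega
      · exact h1 k hk
    · intro m rest' heq hm
      exfalso
      have := pv_head_dropWhile pvNonBlank rest m rest' heq
      rw [hm] at this; exact Bool.true_eq_false.mp this
  | case3 l rest elf d hnb ih =>
    -- blank run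
    have hl : l.toList = [] := by
      simp [pvNonBlank] at hnb
      simp [hnb]
    have hsplit : rest = rest.takeWhile (fun s => !pvNonBlank s) ++ rest.dropWhile (fun s => !pvNonBlank s) := by
      simp [List.takeWhile_append_dropWhile]
    calc (List.foldl pvStepA (d, elf) (l :: rest)).1
        = (List.foldl pvStepA (d, elf + 1) rest).1 := by
          simp [pvStepA, hl]
      _ = pvGoB (rest.dropWhile (fun s => !pvNonBlank s))
            (elf + 1 + (rest.takeWhile (fun s => !pvNonBlank s)).length) d := by
          conv_lhs => rw [hsplit]
          rw [List.foldl_append]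
          rw [pv_foldA_blanks _ d (elf + 1)
            (by intro s hs
                have := List.mem_takeWhile_imp hs
                simpa using this)]
          apply ih
          · intro k hk; have := h1 k hk; omega
          · intro m rest' heq hm
            rcases hc : d.contains (elf + 1 + ((rest.takeWhile (fun s => !pvNonBlank s)).length : Int)) with _ | _
            · rfl
            · have := h1 _ hc; omega
      _ = pvGoB (l :: rest) elf d := by rw [pvGoB]; simp [hnb]

-- ===== VERDICT (by name: the statement is the Claim_ definition above) =====
theorem build_calories_statistics_spec : Claim_equal_build_calories_statistics := by
  intro xs _ _
  unfold Spec_build_calories_statistics build_calories_statistics build_calories_statistics_alt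
  congr 1
  exact pv_main xs 1 PySem.Dict.empty (by simp) (by intro _ _ _ _; simp)
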